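-- pv_equiv track=rewrite | github.com/OHMAMMAD/bitCode | binary.py | bi2BCD
-- ===== SOURCE A (Python) =====
-- def bi2BCD(bi):
--     bi = str(bi)
--     output = 0
--
--     i = -1
--     while i >= len(bi) * -1:
--         dig = bi[i]
--
--         if dig == '1':
--             output += 2 ** (i * -1 - 1)
--
--         i -= 1
--     return output
-- ===== SOURCE B (Python) =====
-- def bi2BCD(bi):
--     out = 0
--     for c in str(bi):
--         out = out * 2 + (1 if c == '1' else 0)
--     return out
-- ===== Notes on version B (the rewrite author's own statement) =====
-- stated objective: simpler
-- what changed: Horner's method: a single left-to-right pass doubling an accumulator, instead of A's right-to-left scan with negative indices that sums explicitly computed powers 2**k.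
import Mathlib
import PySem

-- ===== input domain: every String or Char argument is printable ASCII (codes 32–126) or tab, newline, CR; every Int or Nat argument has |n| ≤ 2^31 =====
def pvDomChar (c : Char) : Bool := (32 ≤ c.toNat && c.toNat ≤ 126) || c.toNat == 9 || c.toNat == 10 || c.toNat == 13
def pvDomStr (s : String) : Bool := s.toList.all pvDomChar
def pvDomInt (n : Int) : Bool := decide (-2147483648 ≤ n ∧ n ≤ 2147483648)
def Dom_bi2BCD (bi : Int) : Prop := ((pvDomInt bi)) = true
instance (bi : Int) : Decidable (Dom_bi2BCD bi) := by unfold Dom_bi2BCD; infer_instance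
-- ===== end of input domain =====

-- B replaces A's right-to-left scan summing explicit powers 2**k with a single
-- left-to-right Horner pass that doubles an accumulator (objective: simpler).

-- ===== PORT A =====
-- A's while loop: i runs -1, -2, …, -len(bi); ported as recursion on the number of
-- remaining iterations (len + 1 + i), with i and output carried exactly as in Python.
def bi2BCD_loopA (s : List Char) : Int → Int → Nat → Int
  | _, output, 0 => output
  | i, output, Nat.succ n =>
      match PySem.List.pyGet? s i with
      | none => output   -- unreachable: the loop guard keeps i in range
      | some dig =>
          let output' := if dig = '1' then output + 2 ^ (i * (-1) - 1).toNat else output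
          bi2BCD_loopA s (i - 1) output' n

def bi2BCD (bi : Int) : Int :=
  let s := (PySem.Int.toStr bi).toList
  bi2BCD_loopA s (-1) 0 s.length

-- ===== PORT B =====
def bi2BCD_alt (bi : Int) : Int :=
  (PySem.Int.toStr bi).toList.foldl (fun out c => out * 2 + if c = '1' then 1 else 0) 0

-- ===== PRECONDITION & SPEC =====
def Spec_bi2BCD (bi : Int) (out : Int) : Prop := out = bi2BCD_alt bi
instance (bi : Int) (out : Int) : Decidable (Spec_bi2BCD bi out) := by unfold Spec_bi2BCD; infer_instance

-- ===== CLAIM (what is proved, stated in full; the proofs are below) =====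
def Claim_equal_bi2BCD : Prop := ∀ (bi : Int), Dom_bi2BCD bi → Spec_bi2BCD bi (bi2BCD bi)

-- ===== LEMMAS AND PROOFS =====

-- Horner value of a character list (B's fold from an arbitrary accumulator).
def pvH (a : Int) (l : List Char) : Int :=
  l.foldl (fun out c => out * 2 + if c = '1' then 1 else 0) a

theorem pvH_append_singleton (l : List Char) (c : Char) (a : Int) :
    pvH a (l ++ [c]) = pvH a l * 2 + (if c = '1' then 1 else 0) := by
  simp [pvH]

-- Loop invariant: with n iterations left, i = n - len - 1, and the loop adds the
-- Horner value of the first n characters scaled by 2^(len - n).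
theorem bi2BCD_loopA_eq (s : List Char) (n : Nat) (hn : n ≤ s.length) (out : Int) :
    bi2BCD_loopA s ((n : Int) - s.length - 1) out n
      = out + pvH 0 (s.take n) * 2 ^ (s.length - n) := by
  induction n generalizing out with
  | zero => simp [bi2BCD_loopA, pvH]
  | succ n ih =>
      have hlt : n < s.length := by omega
      have hidx : PySem.List.pyGet? s ((↑(n + 1) : Int) - s.length - 1) = some s[n] := by
        have : ((↑(n + 1) : Int) - s.length - 1) = -((s.length - n : Nat) : Int) := by
          push_cast [Nat.cast_sub hlt.le]; ring
        rw [this, PySem.List.pyGet?_neg_natCast _ _ (by omega) (by omega)]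
        have : s.length - (s.length - n) = n := by omega
        simp [this, hlt]
      rw [bi2BCD_loopA, hidx]
      simp only
      have hstep : ((↑(n + 1) : Int) - s.length - 1) - 1 = (n : Int) - s.length - 1 := by
        push_cast; ring
      have hexp : (((↑(n + 1) : Int) - s.length - 1) * (-1) - 1).toNat = s.length - n - 1 := by
        have h1 : (((↑(n + 1) : Int) - s.length - 1) * (-1) - 1) = ((s.length - n - 1 : Nat) : Int) := by
          push_cast [Nat.cast_sub hlt.le]; ring_nf; omega
        rw [h1, Int.toNat_natCast]
      rw [hstep, ih (by omega)]
      have htake : s.take (n + 1) = s.take n ++ [s[n]] := List.take_succ_eq_append_getElem hlt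
      rw [htake, pvH_append_singleton, hexp]
      have h3 : s.length - (n + 1) = s.length - n - 1 := by omega
      rw [h3]
      have h2 : (2 : Int) ^ (s.length - n) = 2 ^ (s.length - n - 1) * 2 := by
        rw [← pow_succ]; congr 1; omega
      split_ifs with h <;> rw [h2] <;> ring

-- ===== VERDICT (by name: the statement is the Claim_ definition above) =====
theorem bi2BCD_spec : Claim_equal_bi2BCD := by
  intro bi _
  unfold Spec_bi2BCD bi2BCD bi2BCD_alt
  set s := (PySem.Int.toStr bi).toList with hs
  have h := bi2BCD_loopA_eq s s.length le_rfl 0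
  have hi : ((s.length : Int) - s.length - 1) = -1 := by ring
  rw [hi] at h
  simpa [pvH] using h
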